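-- pv_equiv track=rewrite | github.com/Dong-Uri/Algorithm | 프로그래머스/2/147354. 테이블 해시 함수/테이블 해시 함수.py | solution
-- ===== SOURCE A (Python) =====
-- def solution(data, col, row_begin, row_end):
--     data.sort(key=lambda x: (x[col-1], -x[0]))
--     Ss = [0] * (row_end - row_begin + 1)
--     for i in range(row_begin, row_end+1):
--         for n in data[i-1]:
--             Ss[i-row_begin] += n % i
--     answer = 0
--     n = 1
--     while sum(Ss):
--         xor = False
--         for i in range(len(Ss)):
--             if Ss[i] % 2:
--                 if xor:
--                     xor = False
--                 else:
--                     xor = True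
--             Ss[i] //= 2
--         if xor:
--             answer += n
--         n *= 2
--     return answer
-- ===== SOURCE B (Python) =====
-- def solution(data, col, row_begin, row_end):
--     # Same in-place sort; Ss built as one comprehension; the bit-by-bit
--     # reconstruction loop is replaced by a single direct XOR pass.
--     data.sort(key=lambda x: (x[col - 1], -x[0]))
--     Ss = [sum(n % i for n in data[i - 1]) for i in range(row_begin, row_end + 1)]
--     answer = 0
--     for s in Ss:
--         answer ^= s
--     return answer
-- ===== Notes on version B (the rewrite author's own statement) =====
-- stated objective: simpler
-- what changed: The row sums are built by a direct comprehension instead of index-writes into a preallocated zero list, and A's whole while/for bit-extraction machine (peel one bit of every row sum per pass, toggle a parity flag, reassemble the answer power-of-two by power-of-two) is replaced by a single linear XOR fold over the row sums.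
-- outside the precondition, e.g. on solution([[0], [0]], 1, -1, -1): A returns 0, B returns 0
import Mathlib
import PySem

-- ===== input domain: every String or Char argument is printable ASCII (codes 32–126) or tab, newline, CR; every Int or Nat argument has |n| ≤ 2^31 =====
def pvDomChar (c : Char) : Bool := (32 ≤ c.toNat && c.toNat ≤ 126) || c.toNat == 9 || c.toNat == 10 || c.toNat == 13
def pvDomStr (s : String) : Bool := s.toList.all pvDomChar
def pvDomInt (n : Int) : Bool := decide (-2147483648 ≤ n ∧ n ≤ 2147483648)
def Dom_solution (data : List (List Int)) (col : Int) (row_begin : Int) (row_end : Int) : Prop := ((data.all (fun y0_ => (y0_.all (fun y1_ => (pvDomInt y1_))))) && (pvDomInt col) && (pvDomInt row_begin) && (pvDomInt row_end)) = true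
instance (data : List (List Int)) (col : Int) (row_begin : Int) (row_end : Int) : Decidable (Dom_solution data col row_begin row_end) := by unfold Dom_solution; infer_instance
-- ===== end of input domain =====

-- B replaces A's bit-by-bit answer reconstruction with one direct XOR fold (objective:
-- simpler).  Both A and B sort `data` in place in Python; the equivalence proved here is
-- about the return value (the mutation is identical in A and B).

-- ===== PORT A =====
-- 'while sum(Ss): …' ported with explicit fuel; solution passes one more than the sum of
-- the entries' toNat, which bounds the iteration count whenever the entries are
-- nonnegative (they are, under Pre_); the inner 'for i in range(len(Ss))' both toggles
-- the parity flag and halves every entry, ported as one fold with a pair accumulator.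
def pvBitLoop : Nat → List Int → Int → Int → Int
  | 0, _, answer, _ => answer
  | fuel+1, Ss, answer, n =>
    if Ss.sum ≠ 0 then
      let p := Ss.foldl (fun (st : Bool × List Int) s =>
        (if PySem.Int.mod s 2 ≠ 0 then !st.1 else st.1, st.2 ++ [PySem.Int.floordiv s 2]))
        (false, [])
      pvBitLoop fuel p.2 (if p.1 then answer + n else answer) (n * 2)
    else answer

def solution (data : List (List Int)) (col : Int) (row_begin : Int) (row_end : Int) : Int :=
  let d := PySem.List.sorted2 data (fun x => PySem.List.pyGetD x (col - 1) 0)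
            (fun x => -(PySem.List.pyGetD x 0 0))
  let Ss : List Int := List.replicate (row_end - row_begin + 1).toNat 0
  let Ss := (PySem.List.pyRange row_begin (row_end + 1) 1).foldl
    (fun Ss i => (PySem.List.pyGetD d (i - 1) ([] : List Int)).foldl
      (fun Ss n => PySem.List.pySetD Ss (i - row_begin)
        (PySem.List.pyGetD Ss (i - row_begin) 0 + PySem.Int.mod n i)) Ss) Ss
  pvBitLoop ((Ss.map Int.toNat).sum + 1) Ss 0 1

-- ===== PORT B =====
def solution_alt (data : List (List Int)) (col : Int) (row_begin : Int) (row_end : Int) : Int :=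
  let d := PySem.List.sorted2 data (fun x => PySem.List.pyGetD x (col - 1) 0)
            (fun x => -(PySem.List.pyGetD x 0 0))
  let Ss := (PySem.List.pyRange row_begin (row_end + 1) 1).map
    (fun i => ((PySem.List.pyGetD d (i - 1) ([] : List Int)).map
      (fun n => PySem.Int.mod n i)).sum)
  Ss.foldl (fun answer s => PySem.Int.bxor answer s) 0

-- ===== PRECONDITION & SPEC =====
-- Pre_ excludes exactly the inputs on which the Python A does not return normally: a sort
-- key x[col-1] (hence also x[0]) out of range raises IndexError, and a nonempty row range
-- not contained in 1..len(data) reaches a bad row index (IndexError) or a divisor i ≤ 0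
-- (ZeroDivisionError at i = 0; for negative i the bit loop never terminates); the rare
-- nonpositive-range inputs on which A happens to return (every row sum zero) are excluded
-- with them.
def Pre_solution (data : List (List Int)) (col : Int) (row_begin : Int) (row_end : Int) : Prop :=
  (∀ row ∈ data, PySem.Raise.InRange row.length (col - 1)) ∧
  (row_begin ≤ row_end → 1 ≤ row_begin ∧ row_end ≤ (data.length : Int))
instance (data : List (List Int)) (col : Int) (row_begin : Int) (row_end : Int) : Decidable (Pre_solution data col row_begin row_end) := by unfold Pre_solution; infer_instance

def pvWitness_solution : List (List Int) × Int × Int × Int := ([[1, 2], [3, 4]], 1, 1, 2)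

def Spec_solution (data : List (List Int)) (col : Int) (row_begin : Int) (row_end : Int) (out : Int) : Prop := out = solution_alt data col row_begin row_end
instance (data : List (List Int)) (col : Int) (row_begin : Int) (row_end : Int) (out : Int) : Decidable (Spec_solution data col row_begin row_end out) := by unfold Spec_solution; infer_instance

-- ===== CLAIM (what is proved, stated in full; the proofs are below) =====
def Claim_equal_solution : Prop := ∀ (data : List (List Int)) (col : Int) (row_begin : Int) (row_end : Int), Dom_solution data col row_begin row_end → Pre_solution data col row_begin row_end → Spec_solution data col row_begin row_end (solution data col row_begin row_end)

-- ===== LEMMAS AND PROOFS =====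

-- the value at the seam of an append
theorem pvGetDMid (pre t : List Int) (x d : Int) :
    (pre ++ x :: t).getD pre.length d = x := by
  induction pre with
  | nil => rfl
  | cons a pre ih => simp

-- setting at the seam of an append
theorem pvSetMid (pre t : List Int) (x v : Int) :
    (pre ++ x :: t).set pre.length v = pre ++ v :: t := by
  induction pre with
  | nil => rfl
  | cons a pre ih => simp

theorem pvSetFold (f : Int → Int) (row : List Int) :
    ∀ (S : List Int) (j : Nat),
      row.foldl (fun S n => S.set j (S.getD j 0 + f n)) S
        = S.set j (S.getD j 0 + (row.map f).sum) := by
  induction row with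
  | nil =>
    intro S j
    simp only [List.foldl_nil, List.map_nil, List.sum_nil, add_zero]
    by_cases hj : j < S.length
    · rw [List.getD_eq_getElem (hn := hj), List.set_getElem_self]
    · rw [List.set_eq_of_length_le (by omega)]
  | cons x row ih =>
    intro S j
    simp only [List.foldl_cons, List.map_cons, List.sum_cons, ih]
    rw [List.set_set]
    by_cases hj : j < S.length
    · have h2 : (S.set j (S.getD j 0 + f x)).getD j 0 = S.getD j 0 + f x := by
        simp [List.getD, hj]
      rw [h2]; ring_nf
    · have h1 : S.set j (S.getD j 0 + f x) = S := List.set_eq_of_length_le (by omega)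
      rw [h1, List.set_eq_of_length_le (by omega), List.set_eq_of_length_le (by omega)]

theorem pvBuild (rb b : Int) (row : Int → List Int) (f : Int → Int → Int) :
    ∀ (n : Nat) (pre : List Int), n = (b - (rb + pre.length)).toNat →
      (PySem.List.pyRange (rb + pre.length) b 1).foldl
        (fun S i => (row i).foldl
          (fun S m => PySem.List.pySetD S (i - rb)
            (PySem.List.pyGetD S (i - rb) 0 + f i m)) S)
        (pre ++ List.replicate n 0)
      = pre ++ (PySem.List.pyRange (rb + pre.length) b 1).map
          (fun i => ((row i).map (f i)).sum) := by
  intro n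
  induction n with
  | zero =>
    intro pre hn
    have hb : b ≤ rb + pre.length := by omega
    rw [PySem.List.pyRange_one_eq_nil hb]
    simp
  | succ n ih =>
    intro pre hn
    have hb : rb + pre.length < b := by omega
    rw [PySem.List.pyRange_one_cons hb, List.foldl_cons, List.map_cons]
    have hidx : rb + (pre.length : Int) - rb = ((pre.length : Nat) : Int) := by ring
    have hstep :
        (row (rb + pre.length)).foldl
          (fun S m => PySem.List.pySetD S (rb + pre.length - rb)
            (PySem.List.pyGetD S (rb + pre.length - rb) 0 + f (rb + pre.length) m))
          (pre ++ List.replicate (n + 1) 0)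
        = pre ++ ((row (rb + pre.length)).map (f (rb + pre.length))).sum :: List.replicate n 0 := by
      rw [hidx]
      simp only [PySem.List.pySetD_natCast, PySem.List.pyGetD_natCast]
      rw [pvSetFold, List.replicate_succ]
      rw [pvGetDMid pre (List.replicate n 0) 0 0, pvSetMid pre (List.replicate n 0) 0 _, zero_add]
    rw [hstep]
    have hre : pre ++ ((row (rb + pre.length)).map (f (rb + pre.length))).sum :: List.replicate n 0
        = (pre ++ [((row (rb + pre.length)).map (f (rb + pre.length))).sum]) ++ List.replicate n 0 := by
      simp
    rw [hre]
    have hlen : rb + ((pre ++ [((row (rb + pre.length)).map (f (rb + pre.length))).sum]).length : Int)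
        = rb + pre.length + 1 := by simp; ring
    have := ih (pre ++ [((row (rb + pre.length)).map (f (rb + pre.length))).sum]) (by simp; omega)
    rw [hlen] at this
    rw [this]
    simp

def pvXorAll (Y : List Nat) : Nat := Y.foldr (· ^^^ ·) 0

theorem pvXorDivTwo (a b : Nat) : (a ^^^ b) / 2 = a / 2 ^^^ b / 2 := by
  apply Nat.eq_of_testBit_eq
  intro i
  simp [Nat.testBit_div_two, Nat.testBit_xor]

theorem pvFoldlXor (Y : List Nat) : ∀ a : Nat, Y.foldl (· ^^^ ·) a = a ^^^ pvXorAll Y := by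
  induction Y with
  | nil => intro a; simp [pvXorAll]
  | cons y Y ih =>
    intro a
    simp only [List.foldl_cons, ih, pvXorAll, List.foldr_cons]
    rw [Nat.xor_assoc]

theorem pvXorAllDiv (Y : List Nat) : pvXorAll (Y.map (· / 2)) = pvXorAll Y / 2 := by
  induction Y with
  | nil => simp [pvXorAll]
  | cons y Y ih => simp [pvXorAll, List.foldr_cons] at *; rw [ih, pvXorDivTwo]

theorem pvXorAllZero (Y : List Nat) (h : Y.sum = 0) : pvXorAll Y = 0 := by
  induction Y with
  | nil => rfl
  | cons y Y ih =>
    simp only [List.sum_cons] at h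
    have hy : y = 0 := by omega
    have : pvXorAll Y = 0 := ih (by omega)
    simp [pvXorAll, List.foldr_cons] at *
    simp [hy, this]

theorem pvFlag (Y : List Nat) :
    ∀ b : Bool, Y.foldl (fun b y => if y % 2 ≠ 0 then !b else b) b
      = b.xor ((pvXorAll Y).testBit 0) := by
  induction Y with
  | nil => intro b; simp [pvXorAll]
  | cons y Y ih =>
    intro b
    simp only [List.foldl_cons, ih]
    have h1 : pvXorAll (y :: Y) = y ^^^ pvXorAll Y := rfl
    rw [h1, Nat.testBit_xor]
    rcases Nat.mod_two_eq_zero_or_one y with h | h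
    · have : y.testBit 0 = false := by simp [Nat.testBit_zero, h]
      simp [this, h]
    · have : y.testBit 0 = true := by simp [Nat.testBit_zero, h]
      simp only [this, h]
      cases b <;> simp

theorem pvSumHalf (Y : List Nat) : 2 * (Y.map (· / 2)).sum ≤ Y.sum := by
  induction Y with
  | nil => simp
  | cons y Y ih =>
    simp only [List.map_cons, List.sum_cons]
    have := Nat.div_add_mod y 2
    omega

theorem pvLoopEq : ∀ (fuel : Nat) (Y : List Nat) (ans n : Int), Y.sum < fuel →
    pvBitLoop fuel (Y.map (fun y : Nat => (y : Int))) ans n = ans + n * (pvXorAll Y : Int) := by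
  intro fuel
  induction fuel with
  | zero => intro Y ans n h; omega
  | succ fuel ih =>
    intro Y ans n h
    rw [pvBitLoop]
    have hsum : ∀ Z : List Nat, (Z.map (fun y : Nat => (y : Int))).sum = (Z.sum : Int) := by
      intro Z
      induction Z with
      | nil => simp
      | cons z Z ihz => simp only [List.map_cons, List.sum_cons, ihz, Nat.cast_add]
    by_cases h0 : Y.sum = 0
    · rw [if_neg (not_not_intro (by rw [hsum Y]; exact_mod_cast h0))]
      rw [pvXorAllZero Y h0]
      simp
    · rw [if_pos (fun hc => h0 (by exact_mod_cast (hsum Y) ▸ hc))]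
      have hmod : ∀ y : Nat, PySem.Int.mod (y : Int) 2 = ((y % 2 : Nat) : Int) := by
        intro y; exact_mod_cast PySem.Int.mod_natCast y 2
      have hdiv : ∀ y : Nat, PySem.Int.floordiv (y : Int) 2 = ((y / 2 : Nat) : Int) := by
        intro y; exact_mod_cast PySem.Int.floordiv_natCast y 2
      have hp : (Y.map (fun y : Nat => (y : Int))).foldl (fun (st : Bool × List Int) s =>
            (if PySem.Int.mod s 2 ≠ 0 then !st.1 else st.1, st.2 ++ [PySem.Int.floordiv s 2]))
            (false, [])
          = (Y.foldl (fun b y => if y % 2 ≠ 0 then !b else b) false,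
             ((Y.map (· / 2)).map (fun y : Nat => (y : Int)))) := by
        rw [List.foldl_map]
        simp only [hmod, hdiv, ne_eq, Nat.cast_eq_zero]
        rw [PySem.List.foldl_prod_mk (f := fun b (y : Nat) => if ¬ y % 2 = 0 then !b else b)
          (g := fun (acc : List Int) (y : Nat) => acc ++ [((y / 2 : Nat) : Int)])]
        rw [PySem.List.foldl_append_singleton_eq_map]
        simp only [List.nil_append, List.map_map, Function.comp_def]
      simp only [hp]
      rw [pvFlag Y false]
      rw [ih (Y.map (· / 2)) _ _ (by have := pvSumHalf Y; omega)]
      rw [pvXorAllDiv, Bool.false_xor]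
      rcases Nat.mod_two_eq_zero_or_one (pvXorAll Y) with hx | hx
      · have ht : (pvXorAll Y).testBit 0 = false := by simp [Nat.testBit_zero, hx]
        rw [ht, if_neg Bool.false_ne_true]
        have : (pvXorAll Y : Int) = 2 * ((pvXorAll Y / 2 : Nat) : Int) := by
          have := Nat.div_add_mod (pvXorAll Y) 2
          push_cast
          omega
        rw [this]; ring
      · have ht : (pvXorAll Y).testBit 0 = true := by simp [Nat.testBit_zero, hx]
        rw [ht, if_pos rfl]
        have : (pvXorAll Y : Int) = 2 * ((pvXorAll Y / 2 : Nat) : Int) + 1 := by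
          have := Nat.div_add_mod (pvXorAll Y) 2
          push_cast
          omega
        rw [this]; ring

theorem pvAltFold (Y : List Nat) :
    ∀ a : Nat, (Y.map (fun y : Nat => (y : Int))).foldl (fun answer s => PySem.Int.bxor answer s) (a : Int)
      = ((Y.foldl (· ^^^ ·) a : Nat) : Int) := by
  induction Y with
  | nil => intro a; simp
  | cons y Y ih =>
    intro a
    simp only [List.map_cons, List.foldl_cons, PySem.Int.bxor_natCast, ih]

theorem pvMapToNat (S : List Int) (h : ∀ s ∈ S, 0 ≤ s) :
    (S.map Int.toNat).map (fun y : Nat => (y : Int)) = S := by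
  induction S with
  | nil => rfl
  | cons s S ih =>
    simp only [List.map_cons, List.cons.injEq]
    exact ⟨Int.toNat_of_nonneg (h s (by simp)),
      ih (fun x hx => h x (by simp [hx]))⟩

-- A's Ss-building loop produces exactly B's comprehension
theorem pvSsEq (d : List (List Int)) (rb re : Int) :
    (PySem.List.pyRange rb (re + 1) 1).foldl
      (fun Ss i => (PySem.List.pyGetD d (i - 1) ([] : List Int)).foldl
        (fun Ss n => PySem.List.pySetD Ss (i - rb)
          (PySem.List.pyGetD Ss (i - rb) 0 + PySem.Int.mod n i)) Ss)
      (List.replicate (re - rb + 1).toNat 0)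
    = (PySem.List.pyRange rb (re + 1) 1).map
        (fun i => ((PySem.List.pyGetD d (i - 1) ([] : List Int)).map
          (fun n => PySem.Int.mod n i)).sum) := by
  have h := pvBuild rb (re + 1) (fun i => PySem.List.pyGetD d (i - 1) ([] : List Int))
      (fun i m => PySem.Int.mod m i) (re - rb + 1).toNat []
      (by simp; omega)
  simp only [List.length_nil, Nat.cast_zero, add_zero, List.nil_append] at h
  exact h

-- under Pre_, every row sum is a sum of n % i with i ≥ 1, hence nonnegative
theorem pvNonneg (d : List (List Int)) (rb re : Int) (h1 : rb ≤ re → 1 ≤ rb) :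
    ∀ s ∈ (PySem.List.pyRange rb (re + 1) 1).map
        (fun i => ((PySem.List.pyGetD d (i - 1) ([] : List Int)).map
          (fun n => PySem.Int.mod n i)).sum), 0 ≤ s := by
  intro s hs
  rw [List.mem_map] at hs
  obtain ⟨i, hi, rfl⟩ := hs
  rw [PySem.List.mem_pyRange_one] at hi
  have hrb : 1 ≤ rb := h1 (by omega)
  apply List.sum_nonneg
  intro x hx
  rw [List.mem_map] at hx
  obtain ⟨m, _, rfl⟩ := hx
  exact PySem.Int.mod_nonneg m (by omega)

-- the fueled bit-reconstruction loop on a nonnegative list is the XOR fold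
theorem pvFinal (S : List Int) (h : ∀ s ∈ S, 0 ≤ s) :
    pvBitLoop ((S.map Int.toNat).sum + 1) S 0 1
      = S.foldl (fun answer s => PySem.Int.bxor answer s) 0 := by
  have hS := pvMapToNat S h
  rw [← hS]
  have hY : (((S.map Int.toNat).map (fun y : Nat => (y : Int))).map Int.toNat)
      = S.map Int.toNat := by
    simp [List.map_map, Function.comp_def]
    intro a _
    omega
  rw [hY]
  rw [pvLoopEq ((S.map Int.toNat).sum + 1) (S.map Int.toNat) 0 1 (by omega)]
  have h0 := pvAltFold (S.map Int.toNat) 0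
  simp only [Nat.cast_zero] at h0
  rw [h0, pvFoldlXor, Nat.zero_xor]
  ring

-- ===== VERDICT (by name: the statement is the Claim_ definition above) =====
theorem solution_spec : Claim_equal_solution := by
  intro data col row_begin row_end hdom hpre
  unfold Spec_solution solution solution_alt
  simp only []
  rw [pvSsEq]
  exact pvFinal _ (pvNonneg _ row_begin row_end (fun h => (hpre.2 h).1))
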